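-- pv_equiv track=rewrite | github.com/leejuntsien/IDSC_2026 | ml_pipeline/ersi.py | _group_by_region
-- ===== SOURCE A (Python) =====
-- def _group_by_region(cols: list, regions: list) -> dict:
--     """Group columns by region keyword (hand, leg, smartwatch, etc.)."""
--     grouped = {r: [] for r in regions}
--     for c in cols:
--         for r in regions:
--             if r.lower() in c.lower():
--                 grouped[r].append(c)
--                 break
--     return grouped
-- ===== SOURCE B (Python) =====
-- def _group_by_region(cols: list, regions: list) -> dict:
--     """Group columns by region keyword (hand, leg, smartwatch, etc.)."""
--     grouped = {r: [] for r in regions}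
--     remaining = cols
--     for r in regions:
--         rl = r.lower()
--         grouped[r] = grouped[r] + [c for c in remaining if rl in c.lower()]
--         remaining = [c for c in remaining if rl not in c.lower()]
--     return grouped
-- ===== Notes on version B (the rewrite author's own statement) =====
-- stated objective: alternative
-- what changed: Flipped the loop nesting: B iterates regions as the outer loop, lowercasing each region once and peeling the matching columns off a shrinking 'remaining' list, instead of A's per-column inner scan over regions with break.
import Mathlib
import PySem

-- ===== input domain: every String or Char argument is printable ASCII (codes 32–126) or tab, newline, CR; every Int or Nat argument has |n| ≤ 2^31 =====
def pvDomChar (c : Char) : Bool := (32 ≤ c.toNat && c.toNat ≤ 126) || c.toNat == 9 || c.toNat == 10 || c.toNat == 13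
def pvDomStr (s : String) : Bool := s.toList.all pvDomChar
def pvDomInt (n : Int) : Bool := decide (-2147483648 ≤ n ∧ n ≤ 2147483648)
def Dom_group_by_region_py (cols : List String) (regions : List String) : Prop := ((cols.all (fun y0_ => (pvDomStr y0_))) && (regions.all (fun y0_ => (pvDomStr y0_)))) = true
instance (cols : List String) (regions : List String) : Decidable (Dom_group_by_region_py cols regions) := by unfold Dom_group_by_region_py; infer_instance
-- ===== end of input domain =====

-- B groups region-outer over a shrinking remaining list instead of A's column-outer scan with break; same results, alternative decomposition.

-- ===== PORT A =====
-- the inner 'for r in regions: if r.lower() in c.lower(): grouped[r].append(c); break' loop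
def pvAInner (c : String) (d : PySem.Dict String (List String)) : List String → PySem.Dict String (List String)
  | [] => d
  | r :: rs =>
      if PySem.Str.isIn (PySem.Str.lower r) (PySem.Str.lower c)
      then d.modify r [] (· ++ [c])
      else pvAInner c d rs

def group_by_region_py (cols : List String) (regions : List String) : List (String × List String) :=
  let grouped := regions.foldl (fun d r => d.insert r ([] : List String)) PySem.Dict.empty
  let grouped := cols.foldl (fun d c => pvAInner c d regions) grouped
  grouped.items

-- ===== PORT B =====
def group_by_region_py_alt (cols : List String) (regions : List String) : List (String × List String) :=
  let grouped := regions.foldl (fun d r => d.insert r ([] : List String)) PySem.Dict.empty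
  let st := regions.foldl
    (fun (p : PySem.Dict String (List String) × List String) r =>
      let rl := PySem.Str.lower r
      (p.1.modify r [] (· ++ p.2.filter (fun c => PySem.Str.isIn rl (PySem.Str.lower c))),
       p.2.filter (fun c => !PySem.Str.isIn rl (PySem.Str.lower c))))
    (grouped, cols)
  st.1.items

-- ===== PRECONDITION & SPEC =====
def Spec_group_by_region_py (cols : List String) (regions : List String) (out : List (String × List String)) : Prop := out = group_by_region_py_alt cols regions
instance (cols : List String) (regions : List String) (out : List (String × List String)) : Decidable (Spec_group_by_region_py cols regions out) := by unfold Spec_group_by_region_py; infer_instance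

-- ===== CLAIM (what is proved, stated in full; the proofs are below) =====
def Claim_equal_group_by_region_py : Prop := ∀ (cols : List String) (regions : List String), Dom_group_by_region_py cols regions → Spec_group_by_region_py cols regions (group_by_region_py cols regions)

-- ===== LEMMAS AND PROOFS =====

-- the match test 'r.lower() in c.lower()', in the Chars normal form
def pvM (r c : String) : Bool :=
  PySem.Chars.isIn (PySem.Chars.lower r.toList) (PySem.Chars.lower c.toList)

theorem pvM_eq (r c : String) :
    PySem.Str.isIn (PySem.Str.lower r) (PySem.Str.lower c) = pvM r c := by
  simp [pvM]

-- first region (in list order) whose lowercase is a substring of c.lower()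
def pvFM (rs : List String) (c : String) : Option String :=
  rs.find? (fun r => pvM r c)

-- the per-column step both per-key lemmas talk about
def pvStepA (rs : List String) (d : PySem.Dict String (List String)) (c : String) :
    PySem.Dict String (List String) :=
  match pvFM rs c with
  | some r => d.modify r [] (· ++ [c])
  | none => d

def pvStepB (p : PySem.Dict String (List String) × List String) (r : String) :
    PySem.Dict String (List String) × List String :=
  (p.1.modify r [] (· ++ p.2.filter (fun c => pvM r c)),
   p.2.filter (fun c => !pvM r c))

theorem pvFM_cons (r : String) (rs : List String) (c : String) :
    pvFM (r :: rs) c = if pvM r c then some r else pvFM rs c := by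
  rw [pvFM, List.find?_cons]
  cases h : pvM r c <;> simp [pvFM]

theorem pvFM_mem {rs : List String} {c r : String} (h : pvFM rs c = some r) : r ∈ rs :=
  List.mem_of_find?_eq_some h

theorem pvFM_match {rs : List String} {c r : String} (h : pvFM rs c = some r) :
    pvM r c = true := by
  unfold pvFM at h
  simpa using List.find?_some h

theorem pvAInner_eq (c : String) (d : PySem.Dict String (List String)) (rs : List String) :
    pvAInner c d rs = pvStepA rs d c := by
  induction rs with
  | nil => simp [pvAInner, pvStepA, pvFM]
  | cons r rs ih =>
      rw [pvAInner, pvM_eq]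
      by_cases h : pvM r c = true
      · rw [if_pos h, pvStepA, pvFM_cons, if_pos h]
      · rw [if_neg h, ih, pvStepA, pvStepA, pvFM_cons,
          if_neg (by simpa using h)]

-- getD of A's column loop
theorem pvA_getD (regions : List String) (cols : List String)
    (d : PySem.Dict String (List String)) (k : String) :
    (cols.foldl (pvStepA regions) d).getD k [] =
      d.getD k [] ++ cols.filter (fun c => pvFM regions c == some k) := by
  induction cols generalizing d with
  | nil => simp
  | cons c cs ih =>
      simp only [List.foldl_cons, List.filter_cons]
      rw [ih]
      cases h : pvFM regions c with
      | none =>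
          simp [pvStepA, h]
      | some r =>
          by_cases hk : r = k
          · subst hk
            simp [pvStepA, h]
          · simp only [pvStepA, h]
            rw [PySem.Dict.getD_modify, if_neg (fun hkr => hk hkr.symm)]
            simpa using hk

-- keys of A's column loop are unchanged when every matched region is already a key
theorem pvA_keys (regions : List String) (cols : List String)
    (d : PySem.Dict String (List String)) (h : ∀ r ∈ regions, d.contains r = true) :
    (cols.foldl (pvStepA regions) d).keys = d.keys := by
  induction cols generalizing d with
  | nil => rfl
  | cons c cs ih =>
      simp only [List.foldl_cons]
      cases hm : pvFM regions c with
      | none => rw [pvStepA, hm]; exact ih d h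
      | some r =>
          rw [pvStepA, hm]
          have hr := h r (pvFM_mem hm)
          rw [ih, PySem.Dict.keys_modify, PySem.Dict.keys_insert_of_contains _ _ hr]
          intro r' hr'
          rw [PySem.Dict.contains_modify]
          simp [h r' hr']

-- getD of B's region loop
theorem pvB_getD (rs : List String) (p : PySem.Dict String (List String) × List String)
    (k : String) :
    ((rs.foldl pvStepB p).1).getD k [] =
      p.1.getD k [] ++ p.2.filter (fun c => pvFM rs c == some k) := by
  induction rs generalizing p with
  | nil => simp [pvFM]
  | cons r rs ih =>
      simp only [List.foldl_cons]
      rw [ih]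
      by_cases hk : k = r
      · subst hk
        have h1 : ∀ c : String, ((pvFM rs c == some k) && !pvM k c) = false := by
          intro c
          by_cases hm : pvFM rs c = some k
          · simp [pvFM_match hm]
          · simp [hm]
        have h2 : ∀ c : String, (pvFM (k :: rs) c == some k) = pvM k c := by
          intro c
          rw [pvFM_cons]
          by_cases hc : pvM k c = true
          · simp [hc]
          · by_cases hm : pvFM rs c = some k
            · exact absurd (pvFM_match hm) hc
            · simp [hc, hm]
        simp only [pvStepB, PySem.Dict.getD_modify, List.filter_filter, h1,
          List.filter_false, List.append_nil, h2, if_true]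
      · have h3 : ∀ c : String,
            ((pvFM rs c == some k) && !pvM r c) = (pvFM (r :: rs) c == some k) := by
          intro c
          rw [pvFM_cons]
          by_cases hc : pvM r c = true
          · simp [hc, Ne.symm hk]
          · simp [hc]
        simp only [pvStepB, PySem.Dict.getD_modify, if_neg hk, List.filter_filter, h3]

-- keys of B's region loop are unchanged when every region is already a key
theorem pvB_keys (rs : List String) (p : PySem.Dict String (List String) × List String)
    (h : ∀ r ∈ rs, p.1.contains r = true) :
    ((rs.foldl pvStepB p).1).keys = p.1.keys := by
  induction rs generalizing p with
  | nil => rfl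
  | cons r rs ih =>
      simp only [List.foldl_cons]
      rw [ih, pvStepB]
      · rw [PySem.Dict.keys_modify,
          PySem.Dict.keys_insert_of_contains _ _ (h r (by simp))]
      · intro r' hr'
        rw [pvStepB]
        simp only [PySem.Dict.contains_modify]
        simp [h r' (by simp [hr'])]

-- the initial dict {r: [] for r in regions}
theorem pvInit_keys (regions : List String) :
    (regions.foldl (fun d r => d.insert r ([] : List String)) PySem.Dict.empty).keys =
      PySem.Set.ofList regions := by
  rw [PySem.Dict.keys_foldl_insert (f := fun _ _ => ([] : List String))]
  simp [PySem.Dict.keys_empty, PySem.Set.update_nil_left]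

theorem pvInit_contains (regions : List String) (r : String) (h : r ∈ regions) :
    (regions.foldl (fun d r => d.insert r ([] : List String)) PySem.Dict.empty).contains r
      = true := by
  rw [PySem.Dict.contains_iff_mem_keys, pvInit_keys]
  exact (PySem.Set.mem_ofList _ _).mpr h

-- ===== VERDICT (by name: the statement is the Claim_ definition above) =====
theorem group_by_region_py_spec : Claim_equal_group_by_region_py := by
  intro cols regions _
  unfold Spec_group_by_region_py group_by_region_py group_by_region_py_alt
  have hstepA : (fun d c => pvAInner c d regions) = pvStepA regions := by
    funext d c; exact pvAInner_eq c d regions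
  have hstepB : (fun (p : PySem.Dict String (List String) × List String) r =>
      let rl := PySem.Str.lower r
      (p.1.modify r [] (· ++ p.2.filter (fun c => PySem.Str.isIn rl (PySem.Str.lower c))),
       p.2.filter (fun c => !PySem.Str.isIn rl (PySem.Str.lower c)))) = pvStepB := by
    funext p r
    simp only [pvStepB, pvM_eq]
  rw [hstepA, hstepB]
  set I := regions.foldl (fun d r => d.insert r ([] : List String)) PySem.Dict.empty with hI
  have hcont : ∀ r ∈ regions, I.contains r = true := fun r hr => pvInit_contains regions r hr
  have hka : (cols.foldl (pvStepA regions) I).keys = I.keys := pvA_keys regions cols I hcont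
  have hkb := pvB_keys regions (I, cols) hcont
  have hnom : I.keys.Nodup := by
    rw [pvInit_keys]
    exact PySem.Set.nodup_ofList regions
  rw [PySem.Dict.items_eq_map_keys _ (by rw [hka]; exact hnom) ([] : List String),
      PySem.Dict.items_eq_map_keys _ (by rw [hkb]; exact hnom) ([] : List String),
      hka, hkb]
  apply List.map_congr_left
  intro k _
  rw [pvA_getD, pvB_getD]
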